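-- pv_equiv track=rewrite | github.com/limits220284/CP | leetcode/816.模糊坐标.py | ambiguousCoordinates
-- ===== SOURCE A (Python) =====
-- from typing import List
--
-- def ambiguousCoordinates(s: str) -> List[str]:
--     # 就是哪里放逗号，哪里放点的问题
--     s = s[1: -1]
--     n = len(s)
--     def check(ss):
--         if "." not in ss:
--             if len(ss) > 1 and ss[0] == '0':
--                 return False
--             return True
--         else:
--             idx = ss.index(".")
--             if idx == 0:
--                 return False
--             if ss[-1] == '0': return False
--             ss = ss[:idx]
--             if len(ss) > 1 and ss[0] == '0':
--                 return False
--             return True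
--
--     ans = []
--     for i in range(1, n):
--         for j in range(i):
--             s1 = s[:j + 1] + "." + s[j + 1: i]
--             if s1[-1] == ".": s1 = s1[: -1]
--             for k in range(i, n):
--                 s2 = s[i: k + 1] + "." + s[k + 1:]
--                 if s2[-1] == ".": s2 = s2[: -1]
--                 if check(s1) and check(s2):
--                     ans.append("(" + s1 + ", " + s2 + ")")
--     return ans
-- ===== SOURCE B (Python) =====
-- from typing import List
--
-- def ambiguousCoordinates(s: str) -> List[str]:
--     t = s[1:-1]
--
--     def ok(c):
--         # a valid number: read off the first two and the last character only
--         if "." in c: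
--             return c[0] != "." and c[-1] != "0" and (c[0] != "0" or c[1] == ".")
--         return len(c) == 1 or c[0] != "0"
--
--     def cands(u, p):
--         # all valid decimal placements of u at positions p, p+1, ..., len(u), recursively
--         if p > len(u):
--             return []
--         c = u[:p] + "." + u[p:]
--         if c[-1] == ".":
--             c = c[:-1]
--         rest = cands(u, p + 1)
--         return ([c] + rest) if ok(c) else rest
--
--     def combine(i):
--         if i >= len(t):
--             return []
--         here = ["(%s, %s)" % (l, r) for l in cands(t[:i], 1) for r in cands(t[i:], 1)]
--         return here + combine(i + 1)
--
--     return combine(1)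
-- ===== Notes on version B (the rewrite author's own statement) =====
-- stated objective: alternative
-- what changed: A's triple (i,j,k) index loop that rebuilds both strings and re-validates the left one for every right index, using an index()/slice-based check, is replaced by a fully recursive decomposition: a recursive cands produces each side's valid placements once per split and a recursive combine concatenates the cross products, with validity read directly off the first two and the last character instead of locating the dot and re-slicing.
import Mathlib
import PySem

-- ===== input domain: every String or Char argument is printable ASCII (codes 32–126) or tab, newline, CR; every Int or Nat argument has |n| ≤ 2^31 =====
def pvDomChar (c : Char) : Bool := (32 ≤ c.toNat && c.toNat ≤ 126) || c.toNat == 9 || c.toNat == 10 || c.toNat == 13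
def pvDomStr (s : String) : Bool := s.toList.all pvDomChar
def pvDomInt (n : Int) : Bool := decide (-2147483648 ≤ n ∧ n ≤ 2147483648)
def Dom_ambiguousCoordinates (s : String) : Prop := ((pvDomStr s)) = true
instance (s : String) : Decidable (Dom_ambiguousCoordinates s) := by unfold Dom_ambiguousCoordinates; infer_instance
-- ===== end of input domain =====

-- B replaces A's triple index loop and index()/slice-based check by a recursive decomposition:
-- each side's valid candidates are generated once per split by a recursive helper whose validity
-- test reads only the first two and the last character; the return value is identical.


-- ===== PORT A =====
-- shared helper (both Pythons contain the idiom `if c[-1] == ".": c = c[:-1]`)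
def pvStripDot (c : List Char) : List Char :=
  if PySem.List.pyGetD c (-1) ' ' = '.' then PySem.List.slice c none (some (-1)) else c
-- shared helper: "(" + l + ", " + r + ")"  (B's `"(%s, %s)" % (l, r)` builds the same string)
def pvFmt (L R : List Char) : String :=
  String.ofList ('(' :: L ++ ',' :: ' ' :: R ++ [')'])
def pvCheckA (ss : List Char) : Bool :=
  if PySem.Chars.isIn ['.'] ss = false then
    if 1 < ss.length ∧ PySem.List.pyGetD ss 0 ' ' = '0' then false else true
  else
    let idx : Int := PySem.Chars.find ss ['.']
    if idx = 0 then false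
    else if PySem.List.pyGetD ss (-1) ' ' = '0' then false
    else
      let ss' := PySem.List.slice ss none (some idx)
      if 1 < ss'.length ∧ PySem.List.pyGetD ss' 0 ' ' = '0' then false else true
def ambiguousCoordinates (s : String) : List String :=
  let cs := PySem.List.slice s.toList (some 1) (some (-1))
  let n : Int := cs.length
  (PySem.List.pyRange 1 n 1).foldl (fun ans i =>
    (PySem.List.pyRange 0 i 1).foldl (fun ans j =>
      let s1 := pvStripDot (PySem.List.slice cs none (some (j + 1)) ++ '.' :: PySem.List.slice cs (some (j + 1)) (some i))
      (PySem.List.pyRange i n 1).foldl (fun ans k =>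
        let s2 := pvStripDot (PySem.List.slice cs (some i) (some (k + 1)) ++ '.' :: PySem.List.slice cs (some (k + 1)) none)
        if pvCheckA s1 && pvCheckA s2 then ans ++ [pvFmt s1 s2] else ans) ans) ans) []

-- ===== PORT B =====
def pvOkB (c : List Char) : Bool :=
  if PySem.Chars.isIn ['.'] c then
    decide (PySem.List.pyGetD c 0 ' ' ≠ '.') && decide (PySem.List.pyGetD c (-1) ' ' ≠ '0') &&
      (decide (PySem.List.pyGetD c 0 ' ' ≠ '0') || decide (PySem.List.pyGetD c 1 ' ' = '.'))
  else
    decide (c.length = 1) || decide (PySem.List.pyGetD c 0 ' ' ≠ '0')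
def pvCandsB (u : List Char) (p : Int) : List (List Char) :=
  if (u.length : Int) < p then []
  else
    let c := pvStripDot (PySem.List.slice u none (some p) ++ '.' :: PySem.List.slice u (some p) none)
    let rest := pvCandsB u (p + 1)
    if pvOkB c then c :: rest else rest
termination_by ((u.length : Int) + 1 - p).toNat
decreasing_by omega
def pvCombine (t : List Char) (i : Int) : List String :=
  if (t.length : Int) ≤ i then []
  else
    ((pvCandsB (PySem.List.slice t none (some i)) 1).flatMap (fun l =>
      (pvCandsB (PySem.List.slice t (some i) none) 1).map (fun r => pvFmt l r)))
    ++ pvCombine t (i + 1)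
termination_by ((t.length : Int) - i).toNat
decreasing_by omega
def ambiguousCoordinates_alt (s : String) : List String :=
  pvCombine (PySem.List.slice s.toList (some 1) (some (-1))) 1

-- ===== PRECONDITION & SPEC =====
def Spec_ambiguousCoordinates (s : String) (out : List String) : Prop := out = ambiguousCoordinates_alt s
instance (s : String) (out : List String) : Decidable (Spec_ambiguousCoordinates s out) := by unfold Spec_ambiguousCoordinates; infer_instance

-- ===== CLAIM (what is proved, stated in full; the proofs are below) =====
def Claim_equal_ambiguousCoordinates : Prop := ∀ (s : String), Dom_ambiguousCoordinates s → Spec_ambiguousCoordinates s (ambiguousCoordinates s)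

-- ===== LEMMAS AND PROOFS =====

-- A's s1 / s2 as functions of (cs, i, j/k), and a side's candidate at dot position p
def pvLeftA (cs : List Char) (i j : Int) : List Char :=
  pvStripDot (PySem.List.slice cs none (some (j + 1)) ++ '.' :: PySem.List.slice cs (some (j + 1)) (some i))
def pvRightA (cs : List Char) (i k : Int) : List Char :=
  pvStripDot (PySem.List.slice cs (some i) (some (k + 1)) ++ '.' :: PySem.List.slice cs (some (k + 1)) none)
def pvCand (t : List Char) (p : Int) : List Char :=
  pvStripDot (PySem.List.slice t none (some p) ++ '.' :: PySem.List.slice t (some p) none)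
-- A's per-side candidate list in filter/map form
def pvCandsF (t : List Char) : List (List Char) :=
  ((PySem.List.pyRange 1 ((t.length : Int) + 1) 1).filter (fun p => pvCheckA (pvCand t p))).map (pvCand t)

theorem checkA_eq_okB (ss : List Char) (hne : ss ≠ []) : pvCheckA ss = pvOkB ss := by
  unfold pvCheckA pvOkB
  have hlen : 0 < ss.length := List.length_pos_iff.mpr hne
  by_cases hin : PySem.Chars.isIn ['.'] ss = true
  · have hf0 : 0 ≤ PySem.Chars.find ss ['.'] :=
      (PySem.Chars.find_nonneg_iff ss ['.']).mpr ((PySem.Chars.isIn_iff_infix ['.'] ss).mp hin)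
    obtain ⟨hpre, hmin⟩ := PySem.Chars.find_spec hf0
    set d := PySem.Chars.find ss ['.'] with hd
    have hdlen : d ≤ (ss.length : Int) := PySem.Chars.find_le_length ss ['.']
    have hdot : ss[d.toNat]? = some '.' := by
      rw [← List.head?_drop]
      obtain ⟨t, ht⟩ := hpre
      rw [← ht]; rfl
    have hdlt : d.toNat < ss.length := by
      by_contra hc
      have hnone : ss[d.toNat]? = none := List.getElem?_eq_none_iff.mpr (by omega)
      rw [hnone] at hdot
      simp at hdot
    have hnot : ∀ i : Nat, i < d.toNat → ss[i]? ≠ some '.' := by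
      intro i hi hc
      refine hmin i hi ?_
      rw [← List.head?_drop] at hc
      obtain ⟨t, ht⟩ := List.head?_eq_some_iff.mp hc
      exact ⟨t, ht.symm⟩
    have h0 : PySem.List.pyGetD ss 0 ' ' = ss[0]'hlen := by
      rw [PySem.List.pyGetD_eq_getElem ss ' ' (by omega) (by exact_mod_cast hlen)]
      rfl
    simp only [hin, Bool.true_eq_false, if_false, if_true]
    by_cases hz : d = 0
    · -- first char is '.'
      have hfirst : ss[0]'hlen = '.' := by
        have h' := hdot
        rw [hz] at h'
        rw [List.getElem?_eq_getElem (by omega : (0:Int).toNat < ss.length)] at h'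
        simpa using h'
      rw [if_pos hz]
      simp [h0, hfirst]
    · have hdpos : 0 < d := by omega
      have hc0 : ss[0]'hlen ≠ '.' := by
        intro hc
        exact hnot 0 (by omega) (by rw [List.getElem?_eq_getElem hlen]; exact congrArg some hc)
      rw [if_neg hz]
      by_cases hlast : PySem.List.pyGetD ss (-1) ' ' = '0'
      · simp [hlast, h0, hc0]
      · rw [if_neg hlast]
        have hsl : PySem.List.slice ss none (some d) = ss.take d.toNat := PySem.List.slice_to ss hf0
        have hlen' : (PySem.List.slice ss none (some d)).length = d.toNat := by
          rw [hsl, List.length_take]; omega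
        have hget : PySem.List.pyGetD (PySem.List.slice ss none (some d)) 0 ' ' = ss[0]'hlen := by
          rw [hsl, PySem.List.pyGetD_zero]
          rcases ss with _ | ⟨a, t⟩
          · simp at hlen
          · have : d.toNat = d.toNat - 1 + 1 := by omega
            rw [this]; simp [List.take_succ_cons]
        by_cases hone : d = 1
        · -- second char is '.'
          have h1lt : 1 < ss.length := by omega
          have hc1 : PySem.List.pyGetD ss 1 ' ' = '.' := by
            rw [PySem.List.pyGetD_eq_getElem ss ' ' (by omega) (by exact_mod_cast h1lt)]
            have h' := hdot
            rw [hone] at h'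
            rw [List.getElem?_eq_getElem (by omega : (1:Int).toNat < ss.length)] at h'
            simpa using h'
          rw [hlen']
          have : ¬ (1 < d.toNat ∧ PySem.List.pyGetD (PySem.List.slice ss none (some d)) 0 ' ' = '0') := by
            intro ⟨ha, _⟩; omega
          rw [if_neg this]
          simp [h0, hc0, hlast, hc1]
        · have hd2 : 2 ≤ d := by omega
          have h1lt : 1 < ss.length := by omega
          have hc1 : ss[1]'h1lt ≠ '.' := by
            intro hc
            exact hnot 1 (by omega) (by rw [List.getElem?_eq_getElem h1lt]; exact congrArg some hc)
          have hg1 : PySem.List.pyGetD ss 1 ' ' = ss[1]'h1lt := by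
            rw [PySem.List.pyGetD_eq_getElem ss ' ' (by omega) (by exact_mod_cast h1lt)]
            rfl
          rw [hlen', hget]
          by_cases hz0 : ss[0]'hlen = '0'
          · rw [if_pos ⟨by omega, hz0⟩]
            simp [h0, hz0, hlast, hg1, hc1]
          · rw [if_neg (by intro ⟨_, hb⟩; exact hz0 hb)]
            simp [h0, hz0, hc0, hlast]
  · have hin' : PySem.Chars.isIn ['.'] ss = false := by simpa using hin
    simp only [hin', if_true, Bool.false_eq_true, if_false]
    by_cases h : 1 < ss.length ∧ PySem.List.pyGetD ss 0 ' ' = '0'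
    · rw [if_pos h]
      simp [h.2]
      omega
    · rw [if_neg h]
      have : ¬ (1 < ss.length) ∨ PySem.List.pyGetD ss 0 ' ' ≠ '0' := by tauto
      rcases this with h' | h'
      · simp; left; omega
      · simp [h']

theorem pyRange_map_add (a b c : Int) :
    PySem.List.pyRange (a + c) (b + c) 1 = (PySem.List.pyRange a b 1).map (· + c) := by
  rw [PySem.List.pyRange_one, PySem.List.pyRange_one, List.map_map]
  have h : b + c - (a + c) = b - a := by ring
  rw [h]
  apply List.map_congr_left
  intro x _
  simp
  ring

theorem flatMap_shift {β : Type} (F G : Int → List β) (a b c a' b' : Int)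
    (ha : a' = a + c) (hb : b' = b + c)
    (h : ∀ x, a ≤ x → x < b → F x = G (x + c)) :
    (PySem.List.pyRange a b 1).flatMap F = (PySem.List.pyRange a' b' 1).flatMap G := by
  subst ha hb
  rw [pyRange_map_add]
  rw [List.flatMap_map]
  apply List.flatMap_congr
  intro x hx
  rw [PySem.List.mem_pyRange_one] at hx
  exact h x hx.1 hx.2

theorem filter_map_shift {β : Type} (P Q : Int → Bool) (g h : Int → β) (a b c a' b' : Int)
    (ha : a' = a + c) (hb : b' = b + c)
    (hP : ∀ x, a ≤ x → x < b → P x = Q (x + c))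
    (hg : ∀ x, a ≤ x → x < b → g x = h (x + c)) :
    ((PySem.List.pyRange a b 1).filter P).map g = ((PySem.List.pyRange a' b' 1).filter Q).map h := by
  subst ha hb
  rw [pyRange_map_add, List.filter_map, List.map_map]
  have h1 : (PySem.List.pyRange a b 1).filter ((fun x => Q x) ∘ (· + c)) = (PySem.List.pyRange a b 1).filter P := by
    apply List.filter_congr
    intro x hx
    rw [PySem.List.mem_pyRange_one] at hx
    simp only [Function.comp_apply]
    exact (hP x hx.1 hx.2).symm
  rw [h1]
  apply List.map_congr_left
  intro x hx
  rw [List.mem_filter, PySem.List.mem_pyRange_one] at hx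
  simp only [Function.comp_apply]
  exact hg x hx.1.1 hx.1.2

theorem filter_and_const {α : Type} (l : List α) (a : Bool) (q : α → Bool) :
    l.filter (fun k => a && q k) = if a then l.filter q else [] := by
  cases a <;> simp

theorem flatMap_of_filter {α β : Type} (l : List α) (p : α → Bool) (F : α → List β) :
    (l.filter p).flatMap F = l.flatMap (fun x => if p x then F x else []) := by
  induction l with
  | nil => rfl
  | cons x t ih =>
    by_cases h : p x = true <;> simp [h, ih]

theorem cand_left_eq (cs : List Char) (i j : Int) (h0 : 0 ≤ j) (h1 : j < i) :
    pvLeftA cs i j = pvCand (cs.take i.toNat) (j + 1) := by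
  unfold pvLeftA pvCand
  congr 1
  rw [PySem.List.slice_to cs (by omega), PySem.List.slice_to (cs.take i.toNat) (by omega),
      PySem.List.slice_toNat cs (by omega) (by omega), PySem.List.slice_from (cs.take i.toNat) (by omega)]
  congr 1
  · rw [List.take_take, min_eq_left (by omega)]
  · rw [List.drop_take]

theorem cand_right_eq (cs : List Char) (i k : Int) (h0 : 0 ≤ i) (h1 : i ≤ k) :
    pvRightA cs i k = pvCand (cs.drop i.toNat) (k - i + 1) := by
  unfold pvRightA pvCand
  congr 1
  rw [PySem.List.slice_toNat cs (by omega) (by omega), PySem.List.slice_from cs (by omega),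
      PySem.List.slice_to (cs.drop i.toNat) (by omega), PySem.List.slice_from (cs.drop i.toNat) (by omega)]
  congr 1
  · have h : ((k : Int) + 1).toNat - i.toNat = ((k : Int) - i + 1).toNat := by omega
    rw [h]
  · rw [List.drop_drop]
    have h : i.toNat + ((k : Int) - i + 1).toNat = ((k : Int) + 1).toNat := by omega
    rw [h]

theorem per_i (cs : List Char) (i : Int) (h1 : 1 ≤ i) (h2 : i < (cs.length : Int)) :
    (PySem.List.pyRange 0 i 1).flatMap (fun j =>
      ((PySem.List.pyRange i (cs.length : Int) 1).filter (fun k =>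
          pvCheckA (pvLeftA cs i j) && pvCheckA (pvRightA cs i k))).map
        (fun k => pvFmt (pvLeftA cs i j) (pvRightA cs i k)))
    = (pvCandsF (PySem.List.slice cs none (some i))).flatMap (fun L =>
        (pvCandsF (PySem.List.slice cs (some i) none)).map (fun R => pvFmt L R)) := by
  have hi0 : (0 : Int) ≤ i := by omega
  rw [PySem.List.slice_to cs hi0, PySem.List.slice_from cs hi0]
  set tl := cs.take i.toNat with htl
  set tr := cs.drop i.toNat with htr
  have hltl : ((tl.length : Int)) = i := by
    rw [htl]; simp [List.length_take]; omega
  have hltr : ((tr.length : Int)) = (cs.length : Int) - i := by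
    rw [htr]; simp [List.length_drop]; omega
  unfold pvCandsF
  rw [hltl, hltr]
  rw [List.flatMap_map]
  rw [flatMap_of_filter]
  have hA : ∀ j : Int,
      ((PySem.List.pyRange i (cs.length : Int) 1).filter (fun k =>
          pvCheckA (pvLeftA cs i j) && pvCheckA (pvRightA cs i k))).map
        (fun k => pvFmt (pvLeftA cs i j) (pvRightA cs i k))
      = if pvCheckA (pvLeftA cs i j) then
          ((PySem.List.pyRange i (cs.length : Int) 1).filter (fun k => pvCheckA (pvRightA cs i k))).map
            (fun k => pvFmt (pvLeftA cs i j) (pvRightA cs i k))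
        else [] := by
    intro j
    rw [filter_and_const]
    by_cases h : pvCheckA (pvLeftA cs i j) = true <;> simp [h]
  simp only [hA]
  apply flatMap_shift _ _ 0 i 1 1 (i + 1) (by ring) (by ring)
  intro j hj0 hji
  have hcl : pvLeftA cs i j = pvCand tl (j + 1) := cand_left_eq cs i j hj0 hji
  rw [hcl]
  by_cases hok : pvCheckA (pvCand tl (j + 1)) = true
  · simp only [hok, if_true]
    rw [List.map_map]
    apply filter_map_shift _ _ _ _ i (cs.length : Int) (1 - i) 1 ((cs.length : Int) - i + 1) (by ring) (by ring)
    · intro k hk0 hkn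
      have : pvRightA cs i k = pvCand tr (k - i + 1) := cand_right_eq cs i k hi0 hk0
      rw [this]
      have he : k + (1 - i) = k - i + 1 := by ring
      rw [he]
    · intro k hk0 hkn
      have hcr : pvRightA cs i k = pvCand tr (k - i + 1) := cand_right_eq cs i k hi0 hk0
      simp only [Function.comp_apply, hcr]
      have he : k + (1 - i) = k - i + 1 := by ring
      rw [he]
  · simp [hok]

theorem pvCand_ne_nil (u : List Char) (hu : u ≠ []) (p : Int) (hp : 0 ≤ p) :
    pvCand u p ≠ [] := by
  unfold pvCand pvStripDot
  rw [PySem.List.slice_to u hp, PySem.List.slice_from u hp]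
  have hlu : 0 < u.length := List.length_pos_iff.mpr hu
  split_ifs with h
  · rw [PySem.List.slice_to_neg_one]
    apply List.ne_nil_of_length_pos
    simp [List.length_dropLast, List.length_take, List.length_drop]
    omega
  · simp

theorem candsB_filter (u : List Char) (p : Int) :
    pvCandsB u p
      = ((PySem.List.pyRange p ((u.length : Int) + 1) 1).filter (fun q => pvOkB (pvCand u q))).map (pvCand u) := by
  fun_induction pvCandsB u p with
  | case1 p h =>
    rw [PySem.List.pyRange_one]
    have : ((u.length : Int) + 1 - p).toNat = 0 := by omega
    simp [this]
  | case2 p h c rest ih hb =>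
    rw [PySem.List.pyRange_one_cons (by omega), List.filter_cons]
    rw [if_pos (show pvOkB (pvCand u p) = true from ih), List.map_cons, ← hb]
    rfl
  | case3 p h c rest ih hb =>
    rw [PySem.List.pyRange_one_cons (by omega), List.filter_cons]
    rw [if_neg (show ¬ pvOkB (pvCand u p) = true from ih), ← hb]

theorem candsF_eq_candsB (u : List Char) (hu : u ≠ []) : pvCandsF u = pvCandsB u 1 := by
  rw [candsB_filter u 1]
  unfold pvCandsF
  congr 1
  apply List.filter_congr
  intro p hp
  rw [PySem.List.mem_pyRange_one] at hp
  exact checkA_eq_okB (pvCand u p) (pvCand_ne_nil u hu p (by omega))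

theorem combine_eq (t : List Char) (i : Int) :
    pvCombine t i
      = (PySem.List.pyRange i (t.length : Int) 1).flatMap (fun i =>
          (pvCandsB (PySem.List.slice t none (some i)) 1).flatMap (fun l =>
            (pvCandsB (PySem.List.slice t (some i) none) 1).map (fun r => pvFmt l r))) := by
  fun_induction pvCombine t i with
  | case1 i h =>
    rw [PySem.List.pyRange_one]
    have : ((t.length : Int) - i).toNat = 0 := by omega
    simp [this]
  | case2 i h ih =>
    rw [PySem.List.pyRange_one_cons (by omega), List.flatMap_cons, ih]

theorem shapeA (s : String) :
    ambiguousCoordinates s =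
      (PySem.List.pyRange 1 ((PySem.List.slice s.toList (some 1) (some (-1))).length : Int) 1).flatMap (fun i =>
        (PySem.List.pyRange 0 i 1).flatMap (fun j =>
          ((PySem.List.pyRange i ((PySem.List.slice s.toList (some 1) (some (-1))).length : Int) 1).filter (fun k =>
              pvCheckA (pvLeftA (PySem.List.slice s.toList (some 1) (some (-1))) i j) &&
              pvCheckA (pvRightA (PySem.List.slice s.toList (some 1) (some (-1))) i k))).map (fun k =>
            pvFmt (pvLeftA (PySem.List.slice s.toList (some 1) (some (-1))) i j)
                  (pvRightA (PySem.List.slice s.toList (some 1) (some (-1))) i k)))) := by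
  unfold ambiguousCoordinates pvLeftA pvRightA
  simp only [PySem.List.foldl_append_if, PySem.List.foldl_append_eq_flatMap]
  simp

theorem main_eq (s : String) : ambiguousCoordinates s = ambiguousCoordinates_alt s := by
  rw [shapeA]
  unfold ambiguousCoordinates_alt
  rw [combine_eq]
  apply List.flatMap_congr
  intro i hi
  rw [PySem.List.mem_pyRange_one] at hi
  rw [per_i _ i hi.1 hi.2]
  have h1 : (0 : Int) ≤ i := by omega
  have hl : PySem.List.slice (PySem.List.slice s.toList (some 1) (some (-1))) none (some i) ≠ [] := by
    rw [PySem.List.slice_to _ h1]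
    apply List.ne_nil_of_length_pos
    rw [List.length_take]
    omega
  have hr : PySem.List.slice (PySem.List.slice s.toList (some 1) (some (-1))) (some i) none ≠ [] := by
    rw [PySem.List.slice_from _ h1]
    apply List.ne_nil_of_length_pos
    rw [List.length_drop]
    omega
  rw [candsF_eq_candsB _ hl, candsF_eq_candsB _ hr]

-- ===== VERDICT (by name: the statement is the Claim_ definition above) =====
theorem ambiguousCoordinates_spec : Claim_equal_ambiguousCoordinates := by
  intro s _
  show ambiguousCoordinates s = ambiguousCoordinates_alt s
  exact main_eq s
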